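-- pv_equiv track=rewrite | github.com/Mavuks/Iti0102 | EX09A/princesses.py | sort_by_status
-- ===== SOURCE A (Python) =====
-- def sort_by_status(filtered_lines) -> list:
--     """
--     Sort lines by pattern FIGHTS FOR LIFE > INJURED > IN PANIC > BORED.
--
--     FIGHTS FOR LIFE comes before INJURED etc.
--
--     :param filtered_lines:
--     :return: sorted lines.
--     """
--     sorted = []
--     for i in range(len(filtered_lines)):
--         if filtered_lines[i][1] == "FIGHTS FOR LIFE":
--             sorted.append(filtered_lines[i])
--     for i in range(len(filtered_lines)):
--         if filtered_lines[i][1] == "INJURED":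
--             sorted.append(filtered_lines[i])
--     for i in range(len(filtered_lines)):
--         if filtered_lines[i][1] == "IN PANIC":
--             sorted.append(filtered_lines[i])
--     for i in range(len(filtered_lines)):
--         if filtered_lines[i][1] == "BORED":
--             sorted.append(filtered_lines[i])
--     return sorted
-- ===== SOURCE B (Python) =====
-- def sort_by_status(filtered_lines) -> list:
--     """One pass into four status buckets, then concatenate in priority order."""
--     buckets = {"FIGHTS FOR LIFE": [], "INJURED": [], "IN PANIC": [], "BORED": []}
--     for line in filtered_lines:
--         if line[1] in buckets:
--             buckets[line[1]].append(line)
--     return (buckets["FIGHTS FOR LIFE"] + buckets["INJURED"]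
--             + buckets["IN PANIC"] + buckets["BORED"])
-- ===== Notes on version B (the rewrite author's own statement) =====
-- stated objective: simpler
-- what changed: Replaces four separate scans of the list (one per status) with a single pass that drops each line into one of four buckets, then concatenates the buckets in priority order.
import Mathlib
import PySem

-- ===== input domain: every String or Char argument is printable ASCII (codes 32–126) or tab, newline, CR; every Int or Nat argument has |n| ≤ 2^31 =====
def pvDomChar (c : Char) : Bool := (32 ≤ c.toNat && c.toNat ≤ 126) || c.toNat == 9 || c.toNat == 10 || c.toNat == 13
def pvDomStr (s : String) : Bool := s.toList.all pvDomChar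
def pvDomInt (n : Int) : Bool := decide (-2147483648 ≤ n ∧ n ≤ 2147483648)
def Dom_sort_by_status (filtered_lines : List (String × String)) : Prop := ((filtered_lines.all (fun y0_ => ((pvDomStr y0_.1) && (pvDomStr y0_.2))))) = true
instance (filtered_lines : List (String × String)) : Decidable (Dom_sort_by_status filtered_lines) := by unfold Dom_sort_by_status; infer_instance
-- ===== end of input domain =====

-- B replaces A's four repeated scans (one per status) by a single pass into four
-- buckets concatenated in priority order (objective: simpler, one traversal).

-- ===== PORT A =====
-- one 'for i in range(len(filtered_lines)): if filtered_lines[i][1] == status: sorted.append(...)' loop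
def pvScanA (xs : List (String × String)) (status : String) (acc : List (String × String)) :
    List (String × String) :=
  (PySem.List.pyRange 0 (PySem.List.len xs) 1).foldl
    (fun acc i =>
      if (PySem.List.pyGetD xs i ("", "")).2 == status
      then acc ++ [PySem.List.pyGetD xs i ("", "")]
      else acc) acc

def sort_by_status (filtered_lines : List (String × String)) : List (String × String) :=
  let sorted : List (String × String) := []
  let sorted := pvScanA filtered_lines "FIGHTS FOR LIFE" sorted
  let sorted := pvScanA filtered_lines "INJURED" sorted
  let sorted := pvScanA filtered_lines "IN PANIC" sorted
  let sorted := pvScanA filtered_lines "BORED" sorted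
  sorted

-- ===== PORT B =====
-- one pass: each line goes into the bucket of its status (or is dropped), then
-- the four buckets are concatenated in priority order
def sort_by_status_alt (filtered_lines : List (String × String)) : List (String × String) :=
  let b := filtered_lines.foldl
    (fun (s : List (String × String) × List (String × String) × List (String × String) × List (String × String)) p =>
      if p.2 == "FIGHTS FOR LIFE" then (s.1 ++ [p], s.2.1, s.2.2.1, s.2.2.2)
      else if p.2 == "INJURED" then (s.1, s.2.1 ++ [p], s.2.2.1, s.2.2.2)
      else if p.2 == "IN PANIC" then (s.1, s.2.1, s.2.2.1 ++ [p], s.2.2.2)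
      else if p.2 == "BORED" then (s.1, s.2.1, s.2.2.1, s.2.2.2 ++ [p])
      else s)
    ([], [], [], [])
  b.1 ++ b.2.1 ++ b.2.2.1 ++ b.2.2.2

-- ===== PRECONDITION & SPEC =====
def Spec_sort_by_status (filtered_lines : List (String × String)) (out : List (String × String)) : Prop := out = sort_by_status_alt filtered_lines
instance (filtered_lines : List (String × String)) (out : List (String × String)) : Decidable (Spec_sort_by_status filtered_lines out) := by unfold Spec_sort_by_status; infer_instance

-- ===== CLAIM (what is proved, stated in full; the proofs are below) =====
def Claim_equal_sort_by_status : Prop := ∀ (filtered_lines : List (String × String)), Dom_sort_by_status filtered_lines → Spec_sort_by_status filtered_lines (sort_by_status filtered_lines)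

-- ===== LEMMAS AND PROOFS =====

-- A's single scan is 'acc ++ the lines with that status'
theorem pvScanA_eq_filter (xs : List (String × String)) (status : String)
    (acc : List (String × String)) :
    pvScanA xs status acc = acc ++ xs.filter (fun p => p.2 == status) := by
  unfold pvScanA
  rw [PySem.List.foldl_pyRange_zero_pyGetD xs ("", "")
      (fun acc p => if p.2 == status then acc ++ [p] else acc) acc]
  exact PySem.List.foldl_append_if_eq_filter _ _ _

-- B's bucket fold, characterised: each bucket extends by the filter for its status
theorem pvBuckets_eq_filters (xs : List (String × String))
    (a b c d : List (String × String)) :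
    xs.foldl
      (fun (s : List (String × String) × List (String × String) × List (String × String) × List (String × String)) p =>
        if p.2 == "FIGHTS FOR LIFE" then (s.1 ++ [p], s.2.1, s.2.2.1, s.2.2.2)
        else if p.2 == "INJURED" then (s.1, s.2.1 ++ [p], s.2.2.1, s.2.2.2)
        else if p.2 == "IN PANIC" then (s.1, s.2.1, s.2.2.1 ++ [p], s.2.2.2)
        else if p.2 == "BORED" then (s.1, s.2.1, s.2.2.1, s.2.2.2 ++ [p])
        else s)
      (a, b, c, d)
    = (a ++ xs.filter (fun p => p.2 == "FIGHTS FOR LIFE"),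
       b ++ xs.filter (fun p => p.2 == "INJURED"),
       c ++ xs.filter (fun p => p.2 == "IN PANIC"),
       d ++ xs.filter (fun p => p.2 == "BORED")) := by
  induction xs generalizing a b c d with
  | nil => simp
  | cons p t ih =>
    simp only [List.foldl_cons]
    by_cases h1 : p.2 == "FIGHTS FOR LIFE"
    · rw [if_pos h1, ih]
      simp [eq_of_beq h1]
    · by_cases h2 : p.2 == "INJURED"
      · rw [if_neg h1, if_pos h2, ih]
        simp [eq_of_beq h2]
      · by_cases h3 : p.2 == "IN PANIC"
        · rw [if_neg h1, if_neg h2, if_pos h3, ih]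
          simp [eq_of_beq h3]
        · by_cases h4 : p.2 == "BORED"
          · rw [if_neg h1, if_neg h2, if_neg h3, if_pos h4, ih]
            simp [eq_of_beq h4]
          · rw [if_neg h1, if_neg h2, if_neg h3, if_neg h4, ih]
            simp [h1, h2, h3, h4]

-- ===== VERDICT (by name: the statement is the Claim_ definition above) =====
theorem sort_by_status_spec : Claim_equal_sort_by_status := by
  intro xs _
  unfold Spec_sort_by_status sort_by_status sort_by_status_alt
  simp only [pvScanA_eq_filter, pvBuckets_eq_filters, List.nil_append, List.append_assoc]
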